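-- pv_equiv track=rewrite | github.com/atebelskis/CodeWars-tasks | CD_8.py | count_checkerboard
-- ===== SOURCE A (Python) =====
-- def count_checkerboard(width, height, r):
--     a = 0
--     b = 0
--     liekana = width - int(width/r)*r
--     liekana2 = height - int(height / r) * r
--
--     if liekana == 0:
--         for i in range(r+1, width+1, r):
--             a += r
--     '''
--     if width % r == 0:
--         for i in range(int(width/r)+1):
--         if i % 2 != 0:
--             for x in range(resolution+1, width+1, resolution):
--                 a += 1
--         elif i % 2 == 0:
--             for x in range(1, width + 1, resolution):
--                 a += 1
--     '''
--     return a
-- ===== SOURCE B (Python) =====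
-- def count_checkerboard(width, height, r):
--     # height is ignored by the original; kept for the same signature
--     if width % r == 0:
--         return r * len(range(r + 1, width + 1, r))
--     return 0
-- ===== Notes on version B (the rewrite author's own statement) =====
-- stated objective: simpler
-- what changed: Replaces the constant-summing loop (and the manual float-division remainder test) with a single closed-form expression: divisibility via %, and r times the length of the same range.
import Mathlib
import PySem

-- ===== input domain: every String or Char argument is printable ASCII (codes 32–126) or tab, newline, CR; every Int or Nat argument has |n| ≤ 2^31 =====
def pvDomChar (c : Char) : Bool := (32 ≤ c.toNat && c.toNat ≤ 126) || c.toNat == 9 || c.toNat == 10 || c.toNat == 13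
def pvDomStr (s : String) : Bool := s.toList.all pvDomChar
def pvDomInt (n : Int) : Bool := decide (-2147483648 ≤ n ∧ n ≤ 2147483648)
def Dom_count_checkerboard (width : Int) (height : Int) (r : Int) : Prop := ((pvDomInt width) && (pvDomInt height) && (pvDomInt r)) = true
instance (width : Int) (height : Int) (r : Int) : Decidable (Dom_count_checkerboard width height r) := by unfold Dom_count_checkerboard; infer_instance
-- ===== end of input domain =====

-- B replaces A's constant-summing loop and float-division remainder test by a closed-form
-- arithmetic expression (divisibility test + r * range length); objective: simpler.

-- ===== PORT A =====
-- int(width/r) is ported as PySem.Int.truncdiv (exact for |width|,|r| ≤ 2^31 < 2^53, i.e. on Dom)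
def count_checkerboard (width : Int) (height : Int) (r : Int) : Int :=
  let a : Int := 0
  let _b : Int := 0
  let liekana := width - PySem.Int.truncdiv width r * r
  let _liekana2 := height - PySem.Int.truncdiv height r * r
  let a := if liekana = 0 then
      (PySem.List.pyRange (r + 1) (width + 1) r).foldl (fun acc _ => acc + r) a
    else a
  a

-- ===== PORT B =====
def count_checkerboard_alt (width : Int) (height : Int) (r : Int) : Int :=
  if PySem.Int.mod width r = 0 then
    r * ((PySem.List.pyRange (r + 1) (width + 1) r).length : Int)
  else 0

-- ===== PRECONDITION & SPEC =====
-- Pre_ excludes only r = 0, where Python A raises ZeroDivisionError.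
def Pre_count_checkerboard (width : Int) (height : Int) (r : Int) : Prop := r ≠ 0
instance (width : Int) (height : Int) (r : Int) : Decidable (Pre_count_checkerboard width height r) := by unfold Pre_count_checkerboard; infer_instance
def pvWitness_count_checkerboard : Int × Int × Int := (6, 2, 3)

def Spec_count_checkerboard (width : Int) (height : Int) (r : Int) (out : Int) : Prop := out = count_checkerboard_alt width height r
instance (width : Int) (height : Int) (r : Int) (out : Int) : Decidable (Spec_count_checkerboard width height r out) := by unfold Spec_count_checkerboard; infer_instance

-- ===== CLAIM (what is proved, stated in full; the proofs are below) =====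
def Claim_equal_count_checkerboard : Prop := ∀ (width : Int) (height : Int) (r : Int), Dom_count_checkerboard width height r → Pre_count_checkerboard width height r → Spec_count_checkerboard width height r (count_checkerboard width height r)

-- ===== LEMMAS AND PROOFS =====

-- A's loop adds the constant r once per element: it computes acc + r * length.
lemma foldl_add_const (r : Int) (l : List Int) (acc : Int) :
    l.foldl (fun a _ => a + r) acc = acc + r * l.length := by
  induction l generalizing acc with
  | nil => simp
  | cons x xs ih => simp [List.foldl_cons, ih]; ring

-- A's remainder-via-truncating-division test is the divisibility test.
lemma liekana_eq_zero_iff (width r : Int) (hr : r ≠ 0) :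
    width - PySem.Int.truncdiv width r * r = 0 ↔ r ∣ width := by
  constructor
  · intro h
    refine ⟨PySem.Int.truncdiv width r, ?_⟩
    rw [mul_comm]; linarith
  · rintro ⟨k, rfl⟩
    simp [PySem.Int.truncdiv, Int.mul_tdiv_cancel_left k hr, mul_comm]

-- ===== VERDICT (by name: the statement is the Claim_ definition above) =====
theorem count_checkerboard_spec : Claim_equal_count_checkerboard := by
  intro width height r _ hr
  unfold Spec_count_checkerboard count_checkerboard count_checkerboard_alt
  simp only []
  simp only [PySem.Int.mod_eq_zero_iff_dvd]
  by_cases h : r ∣ width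
  · rw [if_pos ((liekana_eq_zero_iff width r hr).mpr h), if_pos h,
        foldl_add_const]
    ring
  · rw [if_neg (fun hz => h ((liekana_eq_zero_iff width r hr).mp hz)), if_neg h]
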